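-- pv_equiv track=rewrite | github.com/im-alexandre/electre_mor | sapevo_web/core/metodo.py | gerar_combinacoes_criterios
-- ===== SOURCE A (Python) =====
-- def gerar_combinacoes_criterios(criterios):
--     '''
--     Funcao que gera combinacoes de criterios e alternativas
--     de acordo os criterios e alternativas cadastrados
--
--     Recebe uma lista com os codigos dos criterios (Queryset)
--     [c1, c2, c3, c4]
--
--     Retorna uma lista de tuplas
--     [(c1, c2), (c1,c3) ('c1', 'c4')]
--
--     -------
--
--     Recebe uma lista com os codigos das alternativas (Queryset)
--     [a1, a2, a3, a4]
--
--     Retorna uma lista de tuplas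
--     [(a1, a2), (a1,a3) ('a1', 'a4')]
--     '''
--     from itertools import product
--
--     criterios_keys = criterios
--     genComb = product(criterios_keys, repeat=2)
--
--     combinacoes = []
--     for subset in genComb:
--         l = list(subset)
--         l.reverse()
--         subset_reversed = tuple(l)
--
--         if not subset[0] == subset[1]:
--             if subset not in combinacoes  and subset_reversed not in combinacoes:
--                 combinacoes.append(subset)
--
--     return combinacoes
-- ===== SOURCE B (Python) =====
-- def pares(xs):
--     if not xs:
--         return []
--     primeiro, resto = xs[0], xs[1:]
--     return [(primeiro, y) for y in resto] + pares(resto)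
--
--
-- def gerar_combinacoes_criterios(criterios):
--     unicos = []
--     for c in criterios:
--         if c not in unicos:
--             unicos.append(c)
--     return pares(unicos)
-- ===== Notes on version B (the rewrite author's own statement) =====
-- stated objective: faster
-- what changed: A scans the full n*n cartesian product and rejects each pair by searching both orientations in the growing result list; B dedups the input once in first-seen order and then emits the triangular pairs of that unique list directly, with no membership search in the output.
import Mathlib
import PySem

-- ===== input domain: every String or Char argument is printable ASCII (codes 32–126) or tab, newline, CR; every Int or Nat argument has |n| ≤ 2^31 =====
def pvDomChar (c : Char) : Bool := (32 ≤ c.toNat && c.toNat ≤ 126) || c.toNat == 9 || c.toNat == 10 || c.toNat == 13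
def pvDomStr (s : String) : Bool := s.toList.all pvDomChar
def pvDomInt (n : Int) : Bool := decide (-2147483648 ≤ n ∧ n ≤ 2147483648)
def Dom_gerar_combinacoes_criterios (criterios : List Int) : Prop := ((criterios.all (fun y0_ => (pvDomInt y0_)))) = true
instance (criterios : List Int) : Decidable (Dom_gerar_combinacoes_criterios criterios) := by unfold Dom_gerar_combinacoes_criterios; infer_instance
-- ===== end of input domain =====

-- B dedups the input in first-seen order and emits triangular pairs directly,
-- instead of A's full-product scan with both-orientation membership tests in the result.

-- ===== PORT A =====
def gerar_combinacoes_criterios (criterios : List Int) : List (Int × Int) :=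
  let genComb := criterios.flatMap (fun x => criterios.map (fun y => (x, y)))
  genComb.foldl (fun combinacoes subset =>
    let subset_reversed := (subset.2, subset.1)
    if ¬ (subset.1 = subset.2) then
      if subset ∉ combinacoes ∧ subset_reversed ∉ combinacoes then
        combinacoes ++ [subset]
      else combinacoes
    else combinacoes) []

-- ===== PORT B =====
def pares : List Int → List (Int × Int)
  | [] => []
  | primeiro :: resto => resto.map (fun y => (primeiro, y)) ++ pares resto

def gerar_combinacoes_criterios_alt (criterios : List Int) : List (Int × Int) :=
  pares (criterios.foldl (fun unicos c => if c ∈ unicos then unicos else unicos ++ [c]) [])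

-- ===== PRECONDITION & SPEC =====
def Spec_gerar_combinacoes_criterios (criterios : List Int) (out : List (Int × Int)) : Prop := out = gerar_combinacoes_criterios_alt criterios
instance (criterios : List Int) (out : List (Int × Int)) : Decidable (Spec_gerar_combinacoes_criterios criterios out) := by unfold Spec_gerar_combinacoes_criterios; infer_instance

-- ===== CLAIM (what is proved, stated in full; the proofs are below) =====
def Claim_equal_gerar_combinacoes_criterios : Prop := ∀ (criterios : List Int), Dom_gerar_combinacoes_criterios criterios → Spec_gerar_combinacoes_criterios criterios (gerar_combinacoes_criterios criterios)

-- ===== LEMMAS AND PROOFS =====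

-- A's inner pass: one fixed first component x swept against the whole list ys.
def innerA (x : Int) (ys : List Int) (acc : List (Int × Int)) : List (Int × Int) :=
  ys.foldl (fun combinacoes y =>
    if ¬ (x = y) then
      if (x, y) ∉ combinacoes ∧ (y, x) ∉ combinacoes then combinacoes ++ [(x, y)]
      else combinacoes
    else combinacoes) acc

-- the new (first-seen, not-yet-seen) elements of l relative to seen-list S, in order
def news (S l : List Int) : List Int :=
  match l with
  | [] => []
  | y :: t => if y ∈ S then news S t else y :: news (S ++ [y]) t

-- elements A's inner pass appends as second components: skip S (already paired) and T
def newys2 (l S T : List Int) : List Int :=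
  match l with
  | [] => []
  | y :: t => if y ∉ S ∧ y ∉ T then y :: newys2 t (S ++ [y]) T else newys2 t S T

theorem mem_news (l : List Int) : ∀ (S : List Int) (y : Int), y ∈ news S l ↔ y ∈ l ∧ y ∉ S := by
  induction l with
  | nil => simp [news]
  | cons a t ih =>
    intro S y
    by_cases h : a ∈ S
    · simp only [news, if_pos h, ih, List.mem_cons]
      constructor
      · rintro ⟨hy, hS⟩; exact ⟨Or.inr hy, hS⟩
      · rintro ⟨rfl | hy, hS⟩
        · exact absurd h hS
        · exact ⟨hy, hS⟩
    · simp only [news, if_neg h, List.mem_cons, ih, List.mem_append,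
        List.not_mem_nil, or_false]
      constructor
      · rintro (rfl | ⟨hy, hS⟩)
        · exact ⟨Or.inl rfl, h⟩
        · exact ⟨Or.inr hy, fun hx => hS (Or.inl hx)⟩
      · rintro ⟨rfl | hy, hS⟩
        · exact Or.inl rfl
        · by_cases hya : y = a
          · exact Or.inl hya
          · exact Or.inr ⟨hy, by rintro (h1 | h1); exact hS h1; exact hya h1⟩

theorem news_absorb (p : List Int) : ∀ (S xs : List Int), (∀ a ∈ p, a ∈ S) → news S (p ++ xs) = news S xs := by
  induction p with
  | nil => intro S xs _; rfl
  | cons a p ih =>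
    intro S xs h
    have ha : a ∈ S := h a (List.mem_cons_self)
    simp only [List.cons_append, news, if_pos ha]
    exact ih S xs (fun b hb => h b (List.mem_cons_of_mem _ hb))

theorem newys2_eq_news (l : List Int) : ∀ (S T : List Int), newys2 l S T = news (T ++ S) l := by
  induction l with
  | nil => intro S T; rfl
  | cons y t ih =>
    intro S T
    by_cases h : y ∉ S ∧ y ∉ T
    · have hm : y ∉ T ++ S := by
        simp only [List.mem_append]; rintro (h1 | h1); exact h.2 h1; exact h.1 h1
      simp only [newys2, if_pos h, news, if_neg hm, ih, List.append_assoc]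
    · have hm : y ∈ T ++ S := by
        simp only [List.mem_append]
        by_cases h1 : y ∈ S
        · exact Or.inr h1
        · by_cases h2 : y ∈ T
          · exact Or.inl h2
          · exact absurd ⟨h1, h2⟩ h
      simp only [newys2, if_neg h, news, if_pos hm, ih]

theorem dedup_eq_news (l : List Int) : ∀ (S : List Int),
    l.foldl (fun unicos c => if c ∈ unicos then unicos else unicos ++ [c]) S = S ++ news S l := by
  induction l with
  | nil => intro S; simp [news]
  | cons c t ih =>
    intro S
    by_cases h : c ∈ S
    · simp only [List.foldl_cons, if_pos h, news, ih]
    · simp only [List.foldl_cons, if_neg h, news, ih, List.append_assoc, List.singleton_append]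

theorem innerA_cons (x y : Int) (t : List Int) (acc : List (Int × Int)) :
    innerA x (y :: t) acc = innerA x t
      (if ¬ (x = y) then
        if (x, y) ∉ acc ∧ (y, x) ∉ acc then acc ++ [(x, y)] else acc
      else acc) := rfl

theorem innerDup (x : Int) : ∀ (l : List Int) (acc : List (Int × Int)),
    (∀ y ∈ l, y ≠ x → ((x, y) ∈ acc ∨ (y, x) ∈ acc)) → innerA x l acc = acc := by
  intro l
  induction l with
  | nil => intro acc _; rfl
  | cons y t ih =>
    intro acc h
    rw [innerA_cons]
    have hstep : (if ¬ (x = y) then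
        if (x, y) ∉ acc ∧ (y, x) ∉ acc then acc ++ [(x, y)] else acc
      else acc) = acc := by
      by_cases hxy : x = y
      · simp [hxy]
      · have := h y List.mem_cons_self (fun hyx => hxy hyx.symm)
        have : ¬ ((x, y) ∉ acc ∧ (y, x) ∉ acc) := by
          rcases this with h1 | h1
          · exact fun hc => hc.1 h1
          · exact fun hc => hc.2 h1
        simp [hxy, this]
    rw [hstep]
    exact ih acc (fun z hz => h z (List.mem_cons_of_mem _ hz))

theorem innerNew (x : Int) (seen : List Int) : ∀ (l S : List Int) (acc : List (Int × Int)),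
    (∀ y, (x, y) ∈ acc ↔ y ∈ S) →
    (∀ y, (y, x) ∈ acc ↔ y ∈ seen) →
    innerA x l acc = acc ++ (newys2 l S (seen ++ [x])).map (fun y => (x, y)) := by
  intro l
  induction l with
  | nil => intro S acc _ _; simp [innerA, newys2]
  | cons y t ih =>
    intro S acc h1 h2
    rw [innerA_cons]
    by_cases hc : y ∉ S ∧ y ∉ (seen ++ [x])
    · have hyx : ¬ (x = y) := by
        intro h; apply hc.2; simp [h]
      have hnotS : (x, y) ∉ acc := fun hm => hc.1 ((h1 y).mp hm)
      have hnseen : y ∉ seen := fun hm => hc.2 (List.mem_append.mpr (Or.inl hm))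
      have hnotR : (y, x) ∉ acc := fun hm => hnseen ((h2 y).mp hm)
      rw [if_pos hyx, if_pos ⟨hnotS, hnotR⟩]
      have h1' : ∀ z, (x, z) ∈ acc ++ [(x, y)] ↔ z ∈ S ++ [y] := by
        intro z
        simp only [List.mem_append, List.mem_singleton, h1, Prod.mk.injEq, true_and]
      have h2' : ∀ z, (z, x) ∈ acc ++ [(x, y)] ↔ z ∈ seen := by
        intro z
        simp only [List.mem_append, List.mem_singleton, h2, Prod.mk.injEq]
        constructor
        · rintro (hm | ⟨rfl, rfl⟩)
          · exact hm
          · exact absurd rfl hyx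
        · exact fun hm => Or.inl hm
      rw [ih (S ++ [y]) (acc ++ [(x, y)]) h1' h2']
      simp only [newys2, if_pos hc, List.map_cons, List.append_assoc,
        List.cons_append, List.nil_append]
    · have hstep : (if ¬ (x = y) then
          if (x, y) ∉ acc ∧ (y, x) ∉ acc then acc ++ [(x, y)] else acc
        else acc) = acc := by
        by_cases hxy : x = y
        · simp [hxy]
        · have : ¬ ((x, y) ∉ acc ∧ (y, x) ∉ acc) := by
            intro hcc
            apply hc
            refine ⟨fun hS => hcc.1 ((h1 y).mpr hS), ?_⟩
            intro hT
            rcases List.mem_append.mp hT with hT | hT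
            · exact hcc.2 ((h2 y).mpr hT)
            · exact hxy (List.mem_singleton.mp hT).symm
          simp [hxy, this]
      rw [hstep, ih S acc h1 h2]
      simp only [newys2, if_neg hc]

theorem foldl_flatMap_inner (ys : List Int) : ∀ (xs : List Int) (acc : List (Int × Int)),
    ((xs.flatMap (fun x => ys.map (fun y => (x, y)))).foldl (fun combinacoes subset =>
      if ¬ (subset.1 = subset.2) then
        if subset ∉ combinacoes ∧ (subset.2, subset.1) ∉ combinacoes then combinacoes ++ [subset]
        else combinacoes
      else combinacoes) acc)
    = xs.foldl (fun a x => innerA x ys a) acc := by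
  intro xs
  induction xs with
  | nil => intro acc; rfl
  | cons x t ih =>
    intro acc
    simp only [List.flatMap_cons, List.foldl_append, List.foldl_cons, List.foldl_map]
    rw [ih]
    rfl

theorem outerG (ys : List Int) : ∀ (xs p seen : List Int) (acc : List (Int × Int)),
    ys = p ++ xs →
    (∀ a ∈ p, a ∈ seen) →
    (∀ a b, (a, b) ∈ acc → a ∈ seen) →
    (∀ y x, x ∈ ys → x ∉ seen → ((y, x) ∈ acc ↔ y ∈ seen)) →
    (∀ x y, x ∈ seen → y ∈ ys → y ≠ x → ((x, y) ∈ acc ∨ (y, x) ∈ acc)) →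
    xs.foldl (fun a x => innerA x ys a) acc = acc ++ pares (news seen xs) := by
  intro xs
  induction xs with
  | nil => intro p seen acc _ _ _ _ _; simp [news, pares]
  | cons x xs' ih =>
    intro p seen acc hys hp h1 h2 h3
    by_cases hx : x ∈ seen
    · -- duplicate first component: the inner pass adds nothing
      have hdup : innerA x ys acc = acc := by
        apply innerDup
        intro y hy hyx
        exact h3 x y hx hy hyx
      simp only [List.foldl_cons, hdup]
      have hys' : ys = (p ++ [x]) ++ xs' := by rw [hys]; simp
      have hp' : ∀ a ∈ p ++ [x], a ∈ seen := by
        intro a ha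
        rcases List.mem_append.mp ha with ha | ha
        · exact hp a ha
        · rw [List.mem_singleton.mp ha]; exact hx
      rw [ih (p ++ [x]) seen acc hys' hp' h1 h2 h3]
      simp only [news, if_pos hx]
    · -- new first component x
      have hxys : x ∈ ys := by rw [hys]; simp
      have hone : ∀ y, (x, y) ∈ acc ↔ y ∈ ([] : List Int) := by
        intro y
        simp only [List.not_mem_nil, iff_false]
        exact fun hm => hx (h1 x y hm)
      have htwo : ∀ y, (y, x) ∈ acc ↔ y ∈ seen := fun y => h2 y x hxys hx
      have hinner : innerA x ys acc
          = acc ++ (news (seen ++ [x]) xs').map (fun y => (x, y)) := by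
        rw [innerNew x seen ys [] acc hone htwo, newys2_eq_news, List.append_nil]
        have : news (seen ++ [x]) ys = news (seen ++ [x]) xs' := by
          rw [hys, news_absorb p _ (x :: xs')
            (fun a ha => List.mem_append.mpr (Or.inl (hp a ha)))]
          show news (seen ++ [x]) ([x] ++ xs') = _
          rw [news_absorb [x] _ xs' (by intro a ha; simp_all)]
        rw [this]
      simp only [List.foldl_cons, hinner]
      set N := news (seen ++ [x]) xs' with hN
      have hmemN : ∀ y, y ∈ N ↔ y ∈ xs' ∧ y ∉ seen ∧ y ≠ x := by
        intro y
        rw [hN, mem_news]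
        simp only [List.mem_append, List.mem_singleton]
        constructor
        · rintro ⟨hy, hn⟩
          exact ⟨hy, fun h => hn (Or.inl h), fun h => hn (Or.inr h)⟩
        · rintro ⟨hy, h1', h2'⟩
          exact ⟨hy, by rintro (h | h); exact h1' h; exact h2' h⟩
      set acc' := acc ++ N.map (fun y => (x, y)) with hacc'
      have hmemacc' : ∀ a b, (a, b) ∈ acc' ↔ (a, b) ∈ acc ∨ (a = x ∧ b ∈ N) := by
        intro a b
        simp only [hacc', List.mem_append, List.mem_map, Prod.mk.injEq]
        constructor
        · rintro (hm | ⟨y, hy, rfl, rfl⟩)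
          · exact Or.inl hm
          · exact Or.inr ⟨rfl, hy⟩
        · rintro (hm | ⟨rfl, hb⟩)
          · exact Or.inl hm
          · exact Or.inr ⟨b, hb, rfl, rfl⟩
      have hys' : ys = (p ++ [x]) ++ xs' := by rw [hys]; simp
      have hp' : ∀ a ∈ p ++ [x], a ∈ seen ++ [x] := by
        intro a ha
        rcases List.mem_append.mp ha with ha | ha
        · exact List.mem_append.mpr (Or.inl (hp a ha))
        · exact List.mem_append.mpr (Or.inr ha)
      have h1' : ∀ a b, (a, b) ∈ acc' → a ∈ seen ++ [x] := by
        intro a b hm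
        rcases (hmemacc' a b).mp hm with hm | ⟨rfl, _⟩
        · exact List.mem_append.mpr (Or.inl (h1 a b hm))
        · exact List.mem_append.mpr (Or.inr (by simp))
      have h2' : ∀ y x', x' ∈ ys → x' ∉ seen ++ [x] → ((y, x') ∈ acc' ↔ y ∈ seen ++ [x]) := by
        intro y x' hx'ys hx'ns
        have hx'nseen : x' ∉ seen := fun h => hx'ns (List.mem_append.mpr (Or.inl h))
        have hx'nx : x' ≠ x := fun h => hx'ns (List.mem_append.mpr (Or.inr (by simp [h])))
        have hx'xs' : x' ∈ xs' := by
          rw [hys] at hx'ys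
          rcases List.mem_append.mp hx'ys with h | h
          · exact absurd (hp _ h) hx'nseen
          · rcases List.mem_cons.mp h with h | h
            · exact absurd h hx'nx
            · exact h
        rw [hmemacc' y x']
        simp only [List.mem_append, List.mem_singleton]
        constructor
        · rintro (hm | ⟨rfl, _⟩)
          · exact Or.inl ((h2 y x' hx'ys hx'nseen).mp hm)
          · exact Or.inr rfl
        · rintro (hm | rfl)
          · exact Or.inl ((h2 y x' hx'ys hx'nseen).mpr hm)
          · exact Or.inr ⟨rfl, (hmemN x').mpr ⟨hx'xs', hx'nseen, hx'nx⟩⟩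
      have h3' : ∀ x'' y, x'' ∈ seen ++ [x] → y ∈ ys → y ≠ x'' →
          ((x'', y) ∈ acc' ∨ (y, x'') ∈ acc') := by
        intro x'' y hx'' hy hyx
        rcases List.mem_append.mp hx'' with hx'' | hx''
        · rcases h3 x'' y hx'' hy hyx with hm | hm
          · exact Or.inl ((hmemacc' _ _).mpr (Or.inl hm))
          · exact Or.inr ((hmemacc' _ _).mpr (Or.inl hm))
        · have hxx : x'' = x := List.mem_singleton.mp hx''
          subst hxx
          by_cases hyseen : y ∈ seen
          · exact Or.inr ((hmemacc' _ _).mpr (Or.inl ((h2 y x'' hxys hx).mpr hyseen)))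
          · have hyxs' : y ∈ xs' := by
              rw [hys] at hy
              rcases List.mem_append.mp hy with h | h
              · exact absurd (hp _ h) hyseen
              · rcases List.mem_cons.mp h with h | h
                · exact absurd h hyx
                · exact h
            exact Or.inl ((hmemacc' _ _).mpr (Or.inr ⟨rfl, (hmemN y).mpr ⟨hyxs', hyseen, hyx⟩⟩))
      rw [ih (p ++ [x]) (seen ++ [x]) acc' hys' hp' h1' h2' h3']
      simp only [news, if_neg hx, pares, ← hN, hacc', List.append_assoc]

-- ===== VERDICT (by name: the statement is the Claim_ definition above) =====
theorem gerar_combinacoes_criterios_spec : Claim_equal_gerar_combinacoes_criterios := by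
  intro criterios _
  show gerar_combinacoes_criterios criterios = gerar_combinacoes_criterios_alt criterios
  unfold gerar_combinacoes_criterios gerar_combinacoes_criterios_alt
  rw [dedup_eq_news, List.nil_append]
  have hb := foldl_flatMap_inner criterios criterios []
  simp only at hb
  rw [hb, outerG criterios criterios [] [] [] rfl (by simp) (by simp) (by simp) (by simp),
    List.nil_append]
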